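-- pv_equiv track=rewrite | github.com/mr-pyle/Tron-2026 | MichaelSadik.py | _partition_and_quality
-- ===== SOURCE A (Python) =====
-- from collections import deque
--
-- _D4   = [(0,-1),(0,1),(-1,0),(1,0)]
--
-- def _inbounds(nx, ny, g):
--     return 0 <= nx < g and 0 <= ny < g
--
-- def _partition_and_quality(pos, board, g):
--     """
--     Simulate claiming `pos`, then analyse the resulting free space.
--
--     Returns:
--       largest_component_size  — cells in largest accessible region
--       quality_score           — weighted quality of largest region
--       dead_ends               — # dead-end cells in largest region
--       n_components            — how many separate components exist
--     """
--     tmp = set(board)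
--     tmp.add(pos)
--     cx, cy = pos
--     seeds = [(cx+dx,cy+dy) for dx,dy in _D4
--              if _inbounds(cx+dx,cy+dy,g) and (cx+dx,cy+dy) not in tmp]
--     if not seeds:
--         return 0, 0, 0, 0
--
--     seen = {}
--     components = []   # list of (size, quality, dead_ends)
--
--     for seed in seeds:
--         if seed in seen:
--             continue
--         idx = len(components)
--         vis = {seed}
--         q   = deque([seed])
--         seen[seed] = idx
--         size = 0
--         qual = 0
--         dead = 0
--
--         while q:
--             ncx, ncy = q.popleft()
--             size += 1
--             local_free = 0
--             for dx,dy in _D4: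
--                 nb = (ncx+dx,ncy+dy)
--                 if _inbounds(nb[0],nb[1],g) and nb not in tmp:
--                     local_free += 1
--                     if nb not in vis:
--                         vis.add(nb); seen[nb] = idx; q.append(nb)
--             qual += 1 + local_free
--             if local_free <= 1:
--                 dead += 1
--
--         components.append((size, qual, dead))
--
--     # Bot enters the largest component
--     best = max(components, key=lambda c: c[0])
--     return best[0], best[1], best[2], len(components)
-- ===== SOURCE B (Python) =====
-- _D4 = [(0, -1), (0, 1), (-1, 0), (1, 0)]
--
--
-- def _partition_and_quality(pos, board, g):
--     """Same analysis via per-seed depth-first closure (explicit stack) plus a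
--     separate aggregation pass, instead of one inline-counting BFS."""
--     blocked = set(board)
--     blocked.add(pos)
--
--     def free(c):
--         return 0 <= c[0] < g and 0 <= c[1] < g and c not in blocked
--
--     cx, cy = pos
--     seeds = [c for c in ((cx + dx, cy + dy) for dx, dy in _D4) if free(c)]
--     if not seeds:
--         return 0, 0, 0, 0
--
--     done = set()          # union of all components found so far
--     comps = []            # (size, quality, dead_ends) per component, seed order
--     for seed in seeds:
--         if seed in done:
--             continue
--         # depth-first closure of the component
--         visited = {seed}
--         stack = [seed]
--         comp = []
--         while stack:
--             x, y = stack.pop()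
--             comp.append((x, y))
--             for dx, dy in _D4:
--                 nb = (x + dx, y + dy)
--                 if free(nb) and nb not in visited:
--                     visited.add(nb)
--                     stack.append(nb)
--         # aggregate afterwards
--         lfs = [sum(1 for dx, dy in _D4 if free((x + dx, y + dy))) for x, y in comp]
--         comps.append((len(comp), len(comp) + sum(lfs), sum(1 for v in lfs if v <= 1)))
--         done |= visited
--
--     best = comps[0]
--     for c in comps[1:]:
--         if c[0] > best[0]:
--             best = c
--     return best[0], best[1], best[2], len(comps)
-- ===== Notes on version B (the rewrite author's own statement) =====
-- stated objective: alternative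
-- what changed: A's single inline-counting BFS (deque + running size/quality/dead-end totals and a global seen-dict) is replaced by a per-seed depth-first closure with an explicit stack that first collects the component and then computes all three statistics in a separate aggregation pass, with the best component picked by a first-wins linear scan instead of max(key=...).
import Mathlib
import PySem

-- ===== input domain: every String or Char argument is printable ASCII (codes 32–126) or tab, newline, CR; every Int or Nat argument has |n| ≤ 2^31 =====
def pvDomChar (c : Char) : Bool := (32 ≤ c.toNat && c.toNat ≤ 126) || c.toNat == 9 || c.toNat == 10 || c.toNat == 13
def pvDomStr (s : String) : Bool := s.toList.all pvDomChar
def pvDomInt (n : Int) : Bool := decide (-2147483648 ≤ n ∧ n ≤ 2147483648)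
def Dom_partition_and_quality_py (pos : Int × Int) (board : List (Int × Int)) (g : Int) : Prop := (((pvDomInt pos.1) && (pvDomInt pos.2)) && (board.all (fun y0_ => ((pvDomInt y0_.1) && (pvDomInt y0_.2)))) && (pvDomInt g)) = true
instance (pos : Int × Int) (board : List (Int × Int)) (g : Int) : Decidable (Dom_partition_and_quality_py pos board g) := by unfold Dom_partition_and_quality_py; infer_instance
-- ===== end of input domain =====

-- B replaces A's inline-counting BFS (queue + running totals + seen-dict) by a per-seed
-- depth-first closure with an explicit stack followed by a separate aggregation pass
-- (objective: alternative decomposition, same asymptotic cost).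
-- The visited/seen structures are used by both Pythons only through membership test and
-- insert, so the ports carry them as Std.HashSet / Std.HashMap (exact for those
-- operations; no iteration order of a Python set/dict is ever observed).

-- ===== PORT A =====

-- shared module constant _D4 and helpers _inbounds / the free-cell test (identical in Source A and Source B)
def pvD4 : List (Int × Int) := [(0, -1), (0, 1), (-1, 0), (1, 0)]

def pvInbounds (nx ny g : Int) : Bool := decide (0 ≤ nx) && decide (nx < g) && decide (0 ≤ ny) && decide (ny < g)

def pvFree (tmp : PySem.Set (Int × Int)) (g : Int) (nb : Int × Int) : Bool :=
  pvInbounds nb.1 nb.2 g && !(PySem.Set.contains tmp nb)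

def pvSeeds (pos : Int × Int) (tmp : PySem.Set (Int × Int)) (g : Int) : List (Int × Int) :=
  (pvD4.map (fun d => (pos.1 + d.1, pos.2 + d.2))).filter (pvFree tmp g)

-- one neighbour step of A's inner 'for dx,dy in _D4' loop; state = (local_free, vis, seen, q)
def pvStepA (tmp : PySem.Set (Int × Int)) (g idx : Int) (c : Int × Int)
    (st : Int × Std.HashSet (Int × Int) × Std.HashMap (Int × Int) Int × List (Int × Int)) (d : Int × Int) :
    Int × Std.HashSet (Int × Int) × Std.HashMap (Int × Int) Int × List (Int × Int) :=
  let nb := (c.1 + d.1, c.2 + d.2)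
  if pvFree tmp g nb then
    if st.2.1.contains nb then (st.1 + 1, st.2.1, st.2.2.1, st.2.2.2)
    else (st.1 + 1, st.2.1.insert nb, st.2.2.1.insert nb idx, st.2.2.2 ++ [nb])
  else st

-- A's 'while q' BFS loop (fuel only expresses the recursion; it never runs out, see pvBFSA_spec)
def pvBFSA (tmp : PySem.Set (Int × Int)) (g idx : Int) :
    Nat → Std.HashSet (Int × Int) → Std.HashMap (Int × Int) Int → List (Int × Int) → Int → Int → Int →
    Std.HashSet (Int × Int) × Std.HashMap (Int × Int) Int × Int × Int × Int
  | 0, vis, seen, _, size, qual, dead => (vis, seen, size, qual, dead)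
  | _ + 1, vis, seen, [], size, qual, dead => (vis, seen, size, qual, dead)
  | fuel + 1, vis, seen, c :: q, size, qual, dead =>
    let s := pvD4.foldl (pvStepA tmp g idx c) (0, vis, seen, q)
    pvBFSA tmp g idx fuel s.2.1 s.2.2.1 s.2.2.2 (size + 1) (qual + 1 + s.1)
      (dead + if s.1 ≤ 1 then 1 else 0)

def partition_and_quality_py (pos : Int × Int) (board : List (Int × Int)) (g : Int) : Int × Int × Int × Int :=
  let tmp := PySem.Set.add (PySem.Set.ofList board) pos
  let seeds := pvSeeds pos tmp g
  if seeds.isEmpty then (0, 0, 0, 0)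
  else
    let r := seeds.foldl (fun (st : Std.HashMap (Int × Int) Int × List (Int × Int × Int)) seed =>
      if st.1.contains seed then st
      else
        let idx : Int := st.2.length
        let b := pvBFSA tmp g idx (g.toNat * g.toNat + 1)
                  ((∅ : Std.HashSet (Int × Int)).insert seed) (st.1.insert seed idx) [seed] 0 0 0
        (b.2.1, st.2 ++ [(b.2.2.1, b.2.2.2.1, b.2.2.2.2)])) ((∅ : Std.HashMap (Int × Int) Int), [])
    match PySem.List.max? r.2 (fun c => c.1) with
    | some best => (best.1, best.2.1, best.2.2, (r.2.length : Int))
    | none => (0, 0, 0, 0)   -- unreachable: components is nonempty when seeds is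

-- ===== PORT B =====

-- one neighbour step of B's DFS 'for dx,dy in _D4' loop; state = (visited, stack)
-- (the Lean stack is Source B's stack reversed: .pop() from the end = take the head here)
def pvStepB (tmp : PySem.Set (Int × Int)) (g : Int) (c : Int × Int)
    (st : Std.HashSet (Int × Int) × List (Int × Int)) (d : Int × Int) :
    Std.HashSet (Int × Int) × List (Int × Int) :=
  let nb := (c.1 + d.1, c.2 + d.2)
  if pvFree tmp g nb && !(st.1.contains nb) then
    (st.1.insert nb, nb :: st.2)
  else st

-- B's 'while stack' depth-first closure; collects the component into comp (Python list.append = Array.push)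
def pvDFSB (tmp : PySem.Set (Int × Int)) (g : Int) :
    Nat → Std.HashSet (Int × Int) → List (Int × Int) → Array (Int × Int) →
    Std.HashSet (Int × Int) × Array (Int × Int)
  | 0, vis, _, comp => (vis, comp)
  | _ + 1, vis, [], comp => (vis, comp)
  | fuel + 1, vis, c :: stk, comp =>
    let s := pvD4.foldl (pvStepB tmp g c) (vis, stk)
    pvDFSB tmp g fuel s.1 s.2 (comp.push c)

-- B's per-cell free-neighbour count (the aggregation pass)
def pvLocalFree (tmp : PySem.Set (Int × Int)) (g : Int) (c : Int × Int) : Int :=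
  ((pvD4.filter (fun d => pvFree tmp g (c.1 + d.1, c.2 + d.2))).length : Int)

def partition_and_quality_py_alt (pos : Int × Int) (board : List (Int × Int)) (g : Int) : Int × Int × Int × Int :=
  let tmp := PySem.Set.add (PySem.Set.ofList board) pos
  let seeds := pvSeeds pos tmp g
  if seeds.isEmpty then (0, 0, 0, 0)
  else
    let r := seeds.foldl (fun (st : Std.HashSet (Int × Int) × List (Int × Int × Int)) seed =>
      if st.1.contains seed then st
      else
        let dr := pvDFSB tmp g (g.toNat * g.toNat + 1) ((∅ : Std.HashSet (Int × Int)).insert seed) [seed] #[]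
        let comp := dr.2.toList
        let lfs := comp.map (pvLocalFree tmp g)
        (st.1.insertMany dr.1.toList,
         st.2 ++ [((comp.length : Int), (comp.length : Int) + lfs.sum,
                   ((lfs.filter (fun v => v ≤ 1)).length : Int))])) ((∅ : Std.HashSet (Int × Int)), [])
    match r.2 with
    | [] => (0, 0, 0, 0)   -- unreachable: comps is nonempty when seeds is
    | c0 :: rest =>
      let best := rest.foldl (fun b c => if b.1 < c.1 then c else b) c0
      (best.1, best.2.1, best.2.2, (r.2.length : Int))

-- ===== PRECONDITION & SPEC =====
def Spec_partition_and_quality_py (pos : Int × Int) (board : List (Int × Int)) (g : Int) (out : Int × Int × Int × Int) : Prop := out = partition_and_quality_py_alt pos board g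
instance (pos : Int × Int) (board : List (Int × Int)) (g : Int) (out : Int × Int × Int × Int) : Decidable (Spec_partition_and_quality_py pos board g out) := by unfold Spec_partition_and_quality_py; infer_instance

-- ===== CLAIM (what is proved, stated in full; the proofs are below) =====
def Claim_equal_partition_and_quality_py : Prop := ∀ (pos : Int × Int) (board : List (Int × Int)) (g : Int), Dom_partition_and_quality_py pos board g → Spec_partition_and_quality_py pos board g (partition_and_quality_py pos board g)

-- ===== LEMMAS AND PROOFS =====

-- cells reachable from seed through free 4-neighbour steps (the component of seed)
inductive PvReach (tmp : PySem.Set (Int × Int)) (g : Int) (seed : Int × Int) : (Int × Int) → Prop where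
  | base : PvReach tmp g seed seed
  | step {c d : Int × Int} : PvReach tmp g seed c → d ∈ pvD4 →
      pvFree tmp g (c.1 + d.1, c.2 + d.2) = true → PvReach tmp g seed (c.1 + d.1, c.2 + d.2)

theorem pvReach_subset (tmp : PySem.Set (Int × Int)) (g : Int) (seed : Int × Int)
    (L : Std.HashSet (Int × Int)) (h0 : seed ∈ L)
    (hsat : ∀ c ∈ L, ∀ d ∈ pvD4, pvFree tmp g (c.1 + d.1, c.2 + d.2) = true → (c.1 + d.1, c.2 + d.2) ∈ L) :
    ∀ x, PvReach tmp g seed x → x ∈ L := by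
  intro x hx
  induction hx with
  | base => exact h0
  | step hr hd hf ih => exact hsat _ ih _ hd hf

-- the finite set of free in-bounds cells, bounding how long the traversals can run
noncomputable def pvGrid (tmp : PySem.Set (Int × Int)) (g : Int) : Finset (Int × Int) :=
  ((Finset.Icc (0 : Int) (g - 1)) ×ˢ (Finset.Icc (0 : Int) (g - 1))).filter
    (fun c => PySem.Set.contains tmp c = false)

theorem pvMem_pvGrid (tmp : PySem.Set (Int × Int)) (g : Int) (x : Int × Int)
    (h : pvFree tmp g x = true) : x ∈ pvGrid tmp g := by
  simp only [pvFree, pvInbounds, Bool.and_eq_true, decide_eq_true_eq, Bool.not_eq_true'] at h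
  simp only [pvGrid, Finset.mem_filter, Finset.mem_product, Finset.mem_Icc]
  refine ⟨⟨⟨?_, ?_⟩, ?_, ?_⟩, h.2⟩ <;> omega

theorem pvCard_pvGrid (tmp : PySem.Set (Int × Int)) (g : Int) :
    (pvGrid tmp g).card ≤ g.toNat * g.toNat := by
  calc (pvGrid tmp g).card ≤ ((Finset.Icc (0 : Int) (g - 1)) ×ˢ (Finset.Icc (0 : Int) (g - 1))).card :=
        Finset.card_filter_le _ _
    _ = (Finset.Icc (0 : Int) (g - 1)).card * (Finset.Icc (0 : Int) (g - 1)).card := Finset.card_product _ _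
    _ ≤ g.toNat * g.toNat := by rw [Int.card_Icc]; exact Nat.mul_le_mul (by omega) (by omega)

theorem pvLength_le_card (tmp : PySem.Set (Int × Int)) (g : Int) (l : List (Int × Int))
    (hnd : l.Nodup) (h : ∀ x ∈ l, pvFree tmp g x = true) :
    l.length ≤ (pvGrid tmp g).card := by
  rw [← List.toFinset_card_of_nodup hnd]
  exact Finset.card_le_card (fun x hx => pvMem_pvGrid tmp g x (h x (List.mem_toFinset.mp hx)))

theorem pvSize_le_card (tmp : PySem.Set (Int × Int)) (g : Int) (m : Std.HashSet (Int × Int))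
    (h : ∀ x ∈ m, pvFree tmp g x = true) : m.size ≤ (pvGrid tmp g).card := by
  have hnd : m.toList.Nodup :=
    (Std.HashSet.distinct_toList (m := m)).imp (fun hab he => by simp [he] at hab)
  rw [← Std.HashSet.length_toList]
  exact pvLength_le_card tmp g m.toList hnd
    (fun x hx => h x (Std.HashSet.mem_toList.mp hx))

-- A's inner neighbour loop, characterised
theorem pvFoldA_spec (tmp : PySem.Set (Int × Int)) (g idx : Int) (c : Int × Int) :
    ∀ (ds : List (Int × Int)) (lf : Int) (vis : Std.HashSet (Int × Int))
      (seen : Std.HashMap (Int × Int) Int) (q : List (Int × Int)),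
    ∃ (new : List (Int × Int)) (visF : Std.HashSet (Int × Int)) (seenF : Std.HashMap (Int × Int) Int),
      ds.foldl (pvStepA tmp g idx c) (lf, vis, seen, q) =
        (lf + (((ds.filter (fun d => pvFree tmp g (c.1 + d.1, c.2 + d.2))).length : Int)),
         visF, seenF, q ++ new) ∧
      (∀ x, x ∈ visF ↔ x ∈ vis ∨ x ∈ new) ∧
      visF.size = vis.size + new.length ∧
      new.Nodup ∧
      (∀ x ∈ new, x ∉ vis) ∧
      (∀ x ∈ new, pvFree tmp g x = true ∧ ∃ d ∈ ds, x = (c.1 + d.1, c.2 + d.2)) ∧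
      (∀ d ∈ ds, pvFree tmp g (c.1 + d.1, c.2 + d.2) = true → (c.1 + d.1, c.2 + d.2) ∈ visF) ∧
      (∀ x, seenF.contains x = true ↔ seen.contains x = true ∨ x ∈ new) := by
  intro ds
  induction ds with
  | nil =>
    intro lf vis seen q
    exact ⟨[], vis, seen, by simp, by simp, by simp, by simp, by simp, by simp, by simp,
      fun x => by simp⟩
  | cons d ds ih =>
    intro lf vis seen q
    simp only [List.foldl_cons]
    by_cases hf : pvFree tmp g (c.1 + d.1, c.2 + d.2) = true
    · by_cases hv : (c.1 + d.1, c.2 + d.2) ∈ vis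
      · have hc : vis.contains (c.1 + d.1, c.2 + d.2) = true :=
          Std.HashSet.contains_iff_mem.mpr hv
        have hstep : pvStepA tmp g idx c (lf, vis, seen, q) d = (lf + 1, vis, seen, q) := by
          simp [pvStepA, hf, hc]
        rw [hstep]
        obtain ⟨new, visF, seenF, heq, hmem, hsize, hnd, hnotin, hfacts, hcov, hseen⟩ :=
          ih (lf + 1) vis seen q
        refine ⟨new, visF, seenF, ?_, hmem, hsize, hnd, hnotin, ?_, ?_, hseen⟩
        · rw [heq]
          have : ((List.filter (fun d => pvFree tmp g (c.1 + d.1, c.2 + d.2)) (d :: ds)).length : Int)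
              = ((List.filter (fun d => pvFree tmp g (c.1 + d.1, c.2 + d.2)) ds).length : Int) + 1 := by
            simp [hf]
          rw [this]; ring_nf
        · intro x hx
          obtain ⟨hfx, d', hd', hx'⟩ := hfacts x hx
          exact ⟨hfx, d', List.mem_cons_of_mem _ hd', hx'⟩
        · intro d' hd' hf'
          rcases List.mem_cons.mp hd' with h | h
          · subst h; exact (hmem _).mpr (Or.inl hv)
          · exact hcov d' h hf'
      · have hc : vis.contains (c.1 + d.1, c.2 + d.2) = false := by
          rw [← Bool.not_eq_true]; simpa [Std.HashSet.contains_iff_mem] using hv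
        have hstep : pvStepA tmp g idx c (lf, vis, seen, q) d =
            (lf + 1, vis.insert (c.1 + d.1, c.2 + d.2),
             seen.insert (c.1 + d.1, c.2 + d.2) idx, q ++ [(c.1 + d.1, c.2 + d.2)]) := by
          simp [pvStepA, hf, hc]
        rw [hstep]
        obtain ⟨new, visF, seenF, heq, hmem, hsize, hnd, hnotin, hfacts, hcov, hseen⟩ :=
          ih (lf + 1) (vis.insert (c.1 + d.1, c.2 + d.2))
            (seen.insert (c.1 + d.1, c.2 + d.2) idx) (q ++ [(c.1 + d.1, c.2 + d.2)])
        have hmemins : ∀ x, x ∈ vis.insert (c.1 + d.1, c.2 + d.2) ↔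
            (c.1 + d.1, c.2 + d.2) = x ∨ x ∈ vis := by
          intro x; rw [Std.HashSet.mem_insert, beq_iff_eq]
        have hnbnew : (c.1 + d.1, c.2 + d.2) ∉ new := fun h =>
          hnotin _ h ((hmemins _).mpr (Or.inl rfl))
        refine ⟨(c.1 + d.1, c.2 + d.2) :: new, visF, seenF, ?_, ?_, ?_, ?_, ?_, ?_, ?_, ?_⟩
        · rw [heq]
          have hcnt : ((List.filter (fun d => pvFree tmp g (c.1 + d.1, c.2 + d.2)) (d :: ds)).length : Int)
              = ((List.filter (fun d => pvFree tmp g (c.1 + d.1, c.2 + d.2)) ds).length : Int) + 1 := by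
            simp [hf]
          rw [hcnt, List.append_assoc]
          congr 1
          ring
        · intro x
          rw [hmem x, hmemins x, List.mem_cons]
          tauto
        · rw [hsize, Std.HashSet.size_insert, if_neg hv, List.length_cons]
          omega
        · exact List.nodup_cons.mpr ⟨hnbnew, hnd⟩
        · intro x hx
          rcases List.mem_cons.mp hx with h | h
          · subst h; exact hv
          · exact fun hxv => hnotin x h ((hmemins x).mpr (Or.inr hxv))
        · intro x hx
          rcases List.mem_cons.mp hx with h | h
          · subst h; exact ⟨hf, d, List.mem_cons_self, rfl⟩
          · obtain ⟨hfx, d', hd', hx'⟩ := hfacts x h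
            exact ⟨hfx, d', List.mem_cons_of_mem _ hd', hx'⟩
        · intro d' hd' hf'
          rcases List.mem_cons.mp hd' with h | h
          · subst h; exact (hmem _).mpr (Or.inl ((hmemins _).mpr (Or.inl rfl)))
          · exact hcov d' h hf'
        · intro x
          rw [hseen x]
          simp only [Std.HashMap.contains_insert, Bool.or_eq_true, beq_iff_eq, List.mem_cons]
          tauto
    · have hstep : pvStepA tmp g idx c (lf, vis, seen, q) d = (lf, vis, seen, q) := by
        simp [pvStepA, hf]
      rw [hstep]
      obtain ⟨new, visF, seenF, heq, hmem, hsize, hnd, hnotin, hfacts, hcov, hseen⟩ :=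
        ih lf vis seen q
      refine ⟨new, visF, seenF, ?_, hmem, hsize, hnd, hnotin, ?_, ?_, hseen⟩
      · rw [heq]
        have : (List.filter (fun d => pvFree tmp g (c.1 + d.1, c.2 + d.2)) (d :: ds)).length
            = (List.filter (fun d => pvFree tmp g (c.1 + d.1, c.2 + d.2)) ds).length := by
          simp [hf]
        rw [this]
      · intro x hx
        obtain ⟨hfx, d', hd', hx'⟩ := hfacts x hx
        exact ⟨hfx, d', List.mem_cons_of_mem _ hd', hx'⟩
      · intro d' hd' hf'
        rcases List.mem_cons.mp hd' with h | h
        · subst h; exact absurd hf' hf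
        · exact hcov d' h hf'

-- B's inner neighbour loop, characterised
theorem pvFoldB_spec (tmp : PySem.Set (Int × Int)) (g : Int) (c : Int × Int) :
    ∀ (ds : List (Int × Int)) (vis : Std.HashSet (Int × Int)) (stk : List (Int × Int)),
    ∃ (new : List (Int × Int)) (visF : Std.HashSet (Int × Int)),
      ds.foldl (pvStepB tmp g c) (vis, stk) = (visF, new.reverse ++ stk) ∧
      (∀ x, x ∈ visF ↔ x ∈ vis ∨ x ∈ new) ∧
      visF.size = vis.size + new.length ∧
      new.Nodup ∧
      (∀ x ∈ new, x ∉ vis) ∧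
      (∀ x ∈ new, pvFree tmp g x = true ∧ ∃ d ∈ ds, x = (c.1 + d.1, c.2 + d.2)) ∧
      (∀ d ∈ ds, pvFree tmp g (c.1 + d.1, c.2 + d.2) = true → (c.1 + d.1, c.2 + d.2) ∈ visF) := by
  intro ds
  induction ds with
  | nil =>
    intro vis stk
    exact ⟨[], vis, by simp, by simp, by simp, by simp, by simp, by simp, by simp⟩
  | cons d ds ih =>
    intro vis stk
    simp only [List.foldl_cons]
    by_cases hcond : (pvFree tmp g (c.1 + d.1, c.2 + d.2) = true) ∧ (c.1 + d.1, c.2 + d.2) ∉ vis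
    · obtain ⟨hf, hv⟩ := hcond
      have hc : vis.contains (c.1 + d.1, c.2 + d.2) = false := by
        rw [← Bool.not_eq_true]; simpa [Std.HashSet.contains_iff_mem] using hv
      have hstep : pvStepB tmp g c (vis, stk) d =
          (vis.insert (c.1 + d.1, c.2 + d.2), (c.1 + d.1, c.2 + d.2) :: stk) := by
        simp [pvStepB, hf, hc]
      rw [hstep]
      obtain ⟨new, visF, heq, hmem, hsize, hnd, hnotin, hfacts, hcov⟩ :=
        ih (vis.insert (c.1 + d.1, c.2 + d.2)) ((c.1 + d.1, c.2 + d.2) :: stk)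
      have hmemins : ∀ x, x ∈ vis.insert (c.1 + d.1, c.2 + d.2) ↔
          (c.1 + d.1, c.2 + d.2) = x ∨ x ∈ vis := by
        intro x; rw [Std.HashSet.mem_insert, beq_iff_eq]
      have hnbnew : (c.1 + d.1, c.2 + d.2) ∉ new := fun h =>
        hnotin _ h ((hmemins _).mpr (Or.inl rfl))
      refine ⟨(c.1 + d.1, c.2 + d.2) :: new, visF, ?_, ?_, ?_, ?_, ?_, ?_, ?_⟩
      · rw [heq]
        simp
      · intro x
        rw [hmem x, hmemins x, List.mem_cons]
        tauto
      · rw [hsize, Std.HashSet.size_insert, if_neg hv, List.length_cons]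
        omega
      · exact List.nodup_cons.mpr ⟨hnbnew, hnd⟩
      · intro x hx
        rcases List.mem_cons.mp hx with h | h
        · subst h; exact hv
        · exact fun hxv => hnotin x h ((hmemins x).mpr (Or.inr hxv))
      · intro x hx
        rcases List.mem_cons.mp hx with h | h
        · subst h; exact ⟨hf, d, List.mem_cons_self, rfl⟩
        · obtain ⟨hfx, d', hd', hx'⟩ := hfacts x h
          exact ⟨hfx, d', List.mem_cons_of_mem _ hd', hx'⟩
      · intro d' hd' hf'
        rcases List.mem_cons.mp hd' with h | h
        · subst h; exact (hmem _).mpr (Or.inl ((hmemins _).mpr (Or.inl rfl)))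
        · exact hcov d' h hf'
    · have hstep : pvStepB tmp g c (vis, stk) d = (vis, stk) := by
        by_cases hf : pvFree tmp g (c.1 + d.1, c.2 + d.2) = true
        · have hv : (c.1 + d.1, c.2 + d.2) ∈ vis := by tauto
          have hcv : vis.contains (c.1 + d.1, c.2 + d.2) = true :=
            Std.HashSet.contains_iff_mem.mpr hv
          simp [pvStepB, hf, hcv]
        · simp [pvStepB, hf]
      rw [hstep]
      obtain ⟨new, visF, heq, hmem, hsize, hnd, hnotin, hfacts, hcov⟩ := ih vis stk
      refine ⟨new, visF, heq, hmem, hsize, hnd, hnotin, ?_, ?_⟩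
      · intro x hx
        obtain ⟨hfx, d', hd', hx'⟩ := hfacts x hx
        exact ⟨hfx, d', List.mem_cons_of_mem _ hd', hx'⟩
      · intro d' hd' hf'
        rcases List.mem_cons.mp hd' with h | h
        · have hv : (c.1 + d'.1, c.2 + d'.2) ∈ vis := by rw [h] at hf' ⊢; tauto
          exact (hmem _).mpr (Or.inl hv)
        · exact hcov d' h hf'

-- A's BFS loop, characterised: the fuel never runs out, and the result is the stats of
-- the processed list P' (an enumeration of the not-yet-processed part of the component)
theorem pvBFSA_spec (tmp : PySem.Set (Int × Int)) (g idx : Int) (S : Int × Int → Prop)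
    (hS : ∀ c d, S c → d ∈ pvD4 → pvFree tmp g (c.1 + d.1, c.2 + d.2) = true → S (c.1 + d.1, c.2 + d.2)) :
    ∀ (fuel : Nat) (vis : Std.HashSet (Int × Int)) (seen : Std.HashMap (Int × Int) Int)
      (q P : List (Int × Int)) (size qual dead : Int),
    (∀ x, x ∈ vis ↔ x ∈ P ∨ x ∈ q) → (P ++ q).Nodup →
    (∀ x ∈ vis, pvFree tmp g x = true) → (∀ x ∈ vis, S x) →
    (∀ c ∈ P, ∀ d ∈ pvD4, pvFree tmp g (c.1 + d.1, c.2 + d.2) = true → (c.1 + d.1, c.2 + d.2) ∈ vis) →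
    ((pvGrid tmp g).card + q.length < fuel + vis.size) →
    ∃ (visF : Std.HashSet (Int × Int)) (seenF : Std.HashMap (Int × Int) Int) (P' : List (Int × Int)),
      pvBFSA tmp g idx fuel vis seen q size qual dead =
        (visF, seenF, size + (P'.length : Int),
         qual + (P'.map (fun x => 1 + pvLocalFree tmp g x)).sum,
         dead + ((P'.filter (fun x => pvLocalFree tmp g x ≤ 1)).length : Int)) ∧
      (∀ x, x ∈ visF ↔ x ∈ P ∨ x ∈ P') ∧
      (P ++ P').Nodup ∧
      (∀ x ∈ q, x ∈ P') ∧
      (∀ x ∈ visF, S x) ∧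
      (∀ c ∈ visF, ∀ d ∈ pvD4, pvFree tmp g (c.1 + d.1, c.2 + d.2) = true → (c.1 + d.1, c.2 + d.2) ∈ visF) ∧
      (∀ x, seenF.contains x = true ↔ seen.contains x = true ∨ (x ∈ visF ∧ x ∉ vis)) := by
  intro fuel
  induction fuel with
  | zero =>
    intro vis seen q P size qual dead hvm hnd hfree hSvis hsat hfuel
    cases q with
    | nil =>
      refine ⟨vis, seen, [], by simp [pvBFSA], ?_, by simpa using hnd, by simp, hSvis, ?_, ?_⟩
      · intro x; simpa using hvm x
      · intro cc hcc dd hdd hfdd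
        have hp : cc ∈ P := by have := (hvm cc).mp hcc; simpa using this
        exact hsat cc hp dd hdd hfdd
      · intro x
        constructor
        · exact Or.inl
        · rintro (h | ⟨h1, h2⟩)
          · exact h
          · exact absurd h1 h2
    | cons c qt =>
      exfalso
      have hlen := pvSize_le_card tmp g vis hfree
      simp only [List.length_cons] at hfuel
      omega
  | succ fuel ih =>
    intro vis seen q P size qual dead hvm hnd hfree hSvis hsat hfuel
    cases q with
    | nil =>
      refine ⟨vis, seen, [], by simp [pvBFSA], ?_, by simpa using hnd, by simp, hSvis, ?_, ?_⟩
      · intro x; simpa using hvm x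
      · intro cc hcc dd hdd hfdd
        have hp : cc ∈ P := by have := (hvm cc).mp hcc; simpa using this
        exact hsat cc hp dd hdd hfdd
      · intro x
        constructor
        · exact Or.inl
        · rintro (h | ⟨h1, h2⟩)
          · exact h
          · exact absurd h1 h2
    | cons c qt =>
      have hcvis : c ∈ vis := (hvm c).mpr (Or.inr List.mem_cons_self)
      have hcS : S c := hSvis c hcvis
      obtain ⟨new, visM, seenM, hfold, hmemM, hsizeM, hnewnd, hnotin, hnew, hcover, hseen1⟩ :=
        pvFoldA_spec tmp g idx c pvD4 0 vis seen qt
      have hstep : pvBFSA tmp g idx (fuel + 1) vis seen (c :: qt) size qual dead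
          = pvBFSA tmp g idx fuel visM seenM (qt ++ new) (size + 1)
              (qual + 1 + (0 + pvLocalFree tmp g c))
              (dead + if (0 + pvLocalFree tmp g c) ≤ 1 then 1 else 0) := by
        simp only [pvBFSA]
        rw [hfold]
        rfl
      have hvm' : ∀ x, x ∈ visM ↔ x ∈ P ++ [c] ∨ x ∈ qt ++ new := by
        intro x
        have h0 := hvm x
        rw [List.mem_cons] at h0
        rw [hmemM x]
        simp only [List.mem_append, List.mem_singleton, h0]
        tauto
      have hnd'' : ((P ++ [c]) ++ (qt ++ new)).Nodup := by
        have hA : ((P ++ c :: qt) ++ new).Nodup := by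
          refine hnd.append hnewnd ?_
          intro x hx hxn
          have hxv : x ∈ vis := (hvm x).mpr (by simpa using List.mem_append.mp hx)
          exact hnotin x hxn hxv
        simpa [List.append_assoc] using hA
      have hfree' : ∀ x ∈ visM, pvFree tmp g x = true := by
        intro x hx
        rcases (hmemM x).mp hx with h | h
        · exact hfree x h
        · exact (hnew x h).1
      have hSvis' : ∀ x ∈ visM, S x := by
        intro x hx
        rcases (hmemM x).mp hx with h | h
        · exact hSvis x h
        · obtain ⟨hfx, d, hd, rfl⟩ := hnew x h
          exact hS c d hcS hd hfx
      have hsat' : ∀ cc ∈ P ++ [c], ∀ d ∈ pvD4,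
          pvFree tmp g (cc.1 + d.1, cc.2 + d.2) = true → (cc.1 + d.1, cc.2 + d.2) ∈ visM := by
        intro cc hcc d hd hf
        rcases List.mem_append.mp hcc with h | h
        · exact (hmemM _).mpr (Or.inl (hsat cc h d hd hf))
        · rw [List.mem_singleton] at h; subst h
          exact hcover d hd hf
      have hfuel' : (pvGrid tmp g).card + (qt ++ new).length < fuel + visM.size := by
        rw [hsizeM]
        simp only [List.length_append, List.length_cons] at hfuel ⊢
        omega
      obtain ⟨visF, seenF, P'', hreceq, hmem, hndF, hqsub, hSF, hsatF, hseenF⟩ :=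
        ih visM seenM (qt ++ new) (P ++ [c]) (size + 1)
          (qual + 1 + (0 + pvLocalFree tmp g c))
          (dead + if (0 + pvLocalFree tmp g c) ≤ 1 then 1 else 0)
          hvm' hnd'' hfree' hSvis' hsat' hfuel'
      have hsub : ∀ y, y ∈ visM → y ∈ visF := by
        intro y hy
        rcases (hvm' y).mp hy with h | h
        · exact (hmem y).mpr (Or.inl h)
        · exact (hmem y).mpr (Or.inr (hqsub y h))
      refine ⟨visF, seenF, c :: P'', ?_, ?_, ?_, ?_, hSF, hsatF, ?_⟩
      · rw [hstep, hreceq]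
        simp only [Prod.mk.injEq]
        refine ⟨trivial, trivial, ?_, ?_, ?_⟩
        · simp only [List.length_cons]; push_cast; ring
        · simp only [List.map_cons, List.sum_cons]; ring
        · simp only [zero_add, List.filter_cons]
          by_cases hlf : pvLocalFree tmp g c ≤ 1
          · rw [if_pos hlf]
            simp only [hlf, decide_true, if_true, List.length_cons]
            push_cast; ring
          · rw [if_neg hlf]
            simp only [hlf, decide_false]
            push_cast; ring
      · intro x
        have := hmem x
        simp only [List.mem_append, List.mem_cons] at this ⊢
        rw [this]; tauto
      · simpa [List.append_assoc] using hndF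
      · intro x hx
        rcases List.mem_cons.mp hx with h | h
        · subst h; exact List.mem_cons_self
        · exact List.mem_cons_of_mem _ (hqsub x (List.mem_append_left _ h))
      · intro x
        rw [hseenF x, hseen1 x]
        have hx1 : x ∈ new → x ∈ visF ∧ x ∉ vis := fun h =>
          ⟨hsub x ((hmemM x).mpr (Or.inr h)), hnotin x h⟩
        constructor
        · rintro ((h | h) | ⟨h1, h2⟩)
          · exact Or.inl h
          · exact Or.inr (hx1 h)
          · exact Or.inr ⟨h1, fun hv => h2 ((hmemM x).mpr (Or.inl hv))⟩
        · rintro (h | ⟨h1, h2⟩)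
          · exact Or.inl (Or.inl h)
          · by_cases hv' : x ∈ visM
            · rcases (hmemM x).mp hv' with h3 | h3
              · exact absurd h3 h2
              · exact Or.inl (Or.inr h3)
            · exact Or.inr ⟨h1, hv'⟩

-- B's DFS loop, characterised the same way
theorem pvDFSB_spec (tmp : PySem.Set (Int × Int)) (g : Int) (S : Int × Int → Prop)
    (hS : ∀ c d, S c → d ∈ pvD4 → pvFree tmp g (c.1 + d.1, c.2 + d.2) = true → S (c.1 + d.1, c.2 + d.2)) :
    ∀ (fuel : Nat) (vis : Std.HashSet (Int × Int)) (stk : List (Int × Int)) (comp : Array (Int × Int)),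
    (∀ x, x ∈ vis ↔ x ∈ comp.toList ∨ x ∈ stk) → (comp.toList ++ stk).Nodup →
    (∀ x ∈ vis, pvFree tmp g x = true) → (∀ x ∈ vis, S x) →
    (∀ c ∈ comp.toList, ∀ d ∈ pvD4, pvFree tmp g (c.1 + d.1, c.2 + d.2) = true → (c.1 + d.1, c.2 + d.2) ∈ vis) →
    ((pvGrid tmp g).card + stk.length < fuel + vis.size) →
    ∃ (visF : Std.HashSet (Int × Int)) (compF : Array (Int × Int)) (P' : List (Int × Int)),
      pvDFSB tmp g fuel vis stk comp = (visF, compF) ∧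
      compF.toList = comp.toList ++ P' ∧
      (∀ x, x ∈ visF ↔ x ∈ comp.toList ∨ x ∈ P') ∧
      (comp.toList ++ P').Nodup ∧
      (∀ x ∈ stk, x ∈ P') ∧
      (∀ x ∈ visF, S x) ∧
      (∀ c ∈ visF, ∀ d ∈ pvD4, pvFree tmp g (c.1 + d.1, c.2 + d.2) = true → (c.1 + d.1, c.2 + d.2) ∈ visF) := by
  intro fuel
  induction fuel with
  | zero =>
    intro vis stk comp hvm hnd hfree hSvis hsat hfuel
    cases stk with
    | nil =>
      refine ⟨vis, comp, [], by simp [pvDFSB], by simp, ?_, by simpa using hnd, by simp, hSvis, ?_⟩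
      · intro x; simpa using hvm x
      · intro cc hcc dd hdd hfdd
        have hp : cc ∈ comp.toList := by have := (hvm cc).mp hcc; simpa using this
        exact hsat cc hp dd hdd hfdd
    | cons c st =>
      exfalso
      have hlen := pvSize_le_card tmp g vis hfree
      simp only [List.length_cons] at hfuel
      omega
  | succ fuel ih =>
    intro vis stk comp hvm hnd hfree hSvis hsat hfuel
    cases stk with
    | nil =>
      refine ⟨vis, comp, [], by simp [pvDFSB], by simp, ?_, by simpa using hnd, by simp, hSvis, ?_⟩
      · intro x; simpa using hvm x
      · intro cc hcc dd hdd hfdd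
        have hp : cc ∈ comp.toList := by have := (hvm cc).mp hcc; simpa using this
        exact hsat cc hp dd hdd hfdd
    | cons c st =>
      have hcvis : c ∈ vis := (hvm c).mpr (Or.inr List.mem_cons_self)
      have hcS : S c := hSvis c hcvis
      obtain ⟨new, visM, hfold, hmemM, hsizeM, hnewnd, hnotin, hnew, hcover⟩ :=
        pvFoldB_spec tmp g c pvD4 vis st
      have hstep : pvDFSB tmp g (fuel + 1) vis (c :: st) comp
          = pvDFSB tmp g fuel visM (new.reverse ++ st) (comp.push c) := by
        simp only [pvDFSB]
        rw [hfold]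
      have hvm' : ∀ x, x ∈ visM ↔ x ∈ (comp.push c).toList ∨ x ∈ new.reverse ++ st := by
        intro x
        have h0 := hvm x
        rw [List.mem_cons] at h0
        rw [hmemM x]
        simp only [Array.toList_push, List.mem_append, List.mem_singleton, List.mem_reverse, h0]
        tauto
      have hnd'' : ((comp.push c).toList ++ (new.reverse ++ st)).Nodup := by
        have hA : ((comp.toList ++ c :: st) ++ new).Nodup := by
          refine hnd.append hnewnd ?_
          intro x hx hxn
          have hxv : x ∈ vis := (hvm x).mpr (by simpa using List.mem_append.mp hx)
          exact hnotin x hxn hxv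
        have hp : ((comp.push c).toList ++ (new.reverse ++ st)).Perm ((comp.toList ++ c :: st) ++ new) := by
          simp only [Array.toList_push, List.append_assoc, List.singleton_append]
          refine List.Perm.append_left comp.toList ?_
          calc (c :: (new.reverse ++ st)).Perm (c :: (st ++ new)) := by
                exact List.Perm.cons c (((List.reverse_perm new).append_right st).trans (List.perm_append_comm))
            _ = c :: st ++ new := by simp
        exact hp.nodup_iff.mpr hA
      have hfree' : ∀ x ∈ visM, pvFree tmp g x = true := by
        intro x hx
        rcases (hmemM x).mp hx with h | h
        · exact hfree x h
        · exact (hnew x h).1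
      have hSvis' : ∀ x ∈ visM, S x := by
        intro x hx
        rcases (hmemM x).mp hx with h | h
        · exact hSvis x h
        · obtain ⟨hfx, d, hd, rfl⟩ := hnew x h
          exact hS c d hcS hd hfx
      have hsat' : ∀ cc ∈ (comp.push c).toList, ∀ d ∈ pvD4,
          pvFree tmp g (cc.1 + d.1, cc.2 + d.2) = true → (cc.1 + d.1, cc.2 + d.2) ∈ visM := by
        intro cc hcc d hd hf
        rw [Array.toList_push] at hcc
        rcases List.mem_append.mp hcc with h | h
        · exact (hmemM _).mpr (Or.inl (hsat cc h d hd hf))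
        · rw [List.mem_singleton] at h; subst h
          exact hcover d hd hf
      have hfuel' : (pvGrid tmp g).card + (new.reverse ++ st).length < fuel + visM.size := by
        rw [hsizeM]
        simp only [List.length_append, List.length_cons, List.length_reverse] at hfuel ⊢
        omega
      obtain ⟨visF, compF, P'', hreceq, hcompF, hmem, hndF, hssub, hSF, hsatF⟩ :=
        ih visM (new.reverse ++ st) (comp.push c) hvm' hnd'' hfree' hSvis' hsat' hfuel'
      refine ⟨visF, compF, c :: P'', ?_, ?_, ?_, ?_, ?_, hSF, hsatF⟩
      · rw [hstep, hreceq]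
      · rw [hcompF, Array.toList_push]
        simp [List.append_assoc]
      · intro x
        have := hmem x
        simp only [Array.toList_push, List.mem_append, List.mem_singleton, List.mem_cons] at this ⊢
        rw [this]; tauto
      · have := hndF
        simpa [Array.toList_push, List.append_assoc] using this
      · intro x hx
        rcases List.mem_cons.mp hx with h | h
        · subst h; exact List.mem_cons_self
        · exact List.mem_cons_of_mem _ (hssub x (List.mem_append_right _ h))

theorem pvSum_one_add (f : (Int × Int) → Int) (l : List (Int × Int)) :
    (l.map (fun x => 1 + f x)).sum = (l.length : Int) + (l.map f).sum := by
  induction l with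
  | nil => simp
  | cons a t ih => simp [ih]; ring

-- the two per-seed component runs produce the same statistics and the same claimed set
theorem pvSeed_run (tmp : PySem.Set (Int × Int)) (g idx : Int) (seed : Int × Int)
    (seen : Std.HashMap (Int × Int) Int) (hfree : pvFree tmp g seed = true) :
    ∃ (a : Std.HashSet (Int × Int) × Std.HashMap (Int × Int) Int × Int × Int × Int)
      (b : Std.HashSet (Int × Int) × Array (Int × Int)),
      pvBFSA tmp g idx (g.toNat * g.toNat + 1) ((∅ : Std.HashSet (Int × Int)).insert seed)
        (seen.insert seed idx) [seed] 0 0 0 = a ∧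
      pvDFSB tmp g (g.toNat * g.toNat + 1) ((∅ : Std.HashSet (Int × Int)).insert seed) [seed] #[] = b ∧
      (a.2.2.1, a.2.2.2.1, a.2.2.2.2) =
        ((b.2.toList.length : Int),
         (b.2.toList.length : Int) + (b.2.toList.map (pvLocalFree tmp g)).sum,
         (((b.2.toList.map (pvLocalFree tmp g)).filter (fun v => v ≤ 1)).length : Int)) ∧
      (∀ x, x ∈ b.1 ↔ PvReach tmp g seed x) ∧
      (∀ x, a.2.1.contains x = true ↔ seen.contains x = true ∨ PvReach tmp g seed x) := by
  have hScl : ∀ c d, PvReach tmp g seed c → d ∈ pvD4 →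
      pvFree tmp g (c.1 + d.1, c.2 + d.2) = true → PvReach tmp g seed (c.1 + d.1, c.2 + d.2) :=
    fun _ _ hc hd hf => PvReach.step hc hd hf
  have hcard := pvCard_pvGrid tmp g
  have hmem0 : ∀ x, x ∈ (∅ : Std.HashSet (Int × Int)).insert seed ↔ x = seed := by
    intro x
    rw [Std.HashSet.mem_insert, beq_iff_eq]
    constructor
    · rintro (h | h)
      · exact h.symm
      · exact absurd h (Std.HashSet.not_mem_empty)
    · intro h; exact Or.inl h.symm
  have hsize0 : ((∅ : Std.HashSet (Int × Int)).insert seed).size = 1 := by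
    rw [Std.HashSet.size_insert, if_neg (Std.HashSet.not_mem_empty), Std.HashSet.size_empty]
  have hsfree : ∀ x ∈ (∅ : Std.HashSet (Int × Int)).insert seed, pvFree tmp g x = true := by
    intro x hx; rw [hmem0 x] at hx; subst hx; exact hfree
  have hsS : ∀ x ∈ (∅ : Std.HashSet (Int × Int)).insert seed, PvReach tmp g seed x := by
    intro x hx; rw [hmem0 x] at hx; subst hx; exact PvReach.base
  obtain ⟨visA, seenFA, PA, heqA, hmemA, hndA, hqA, hSA, hsatA, hseenA⟩ :=
    pvBFSA_spec tmp g idx (PvReach tmp g seed) hScl (g.toNat * g.toNat + 1)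
      ((∅ : Std.HashSet (Int × Int)).insert seed) (seen.insert seed idx) [seed] [] 0 0 0
      (by intro x; rw [hmem0 x]; simp) (by simp)
      hsfree hsS (by simp)
      (by rw [hsize0]; simp only [List.length_cons, List.length_nil]; omega)
  obtain ⟨visB, compB, PB, heqB, hcompB, hmemB, hndB, hsB, hSB, hsatB⟩ :=
    pvDFSB_spec tmp g (PvReach tmp g seed) hScl (g.toNat * g.toNat + 1)
      ((∅ : Std.HashSet (Int × Int)).insert seed) [seed] #[]
      (by intro x; rw [hmem0 x]; simp) (by simp)
      hsfree hsS (by simp)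
      (by rw [hsize0]; simp only [List.length_cons, List.length_nil]; omega)
  have hseedA : seed ∈ visA := (hmemA seed).mpr (Or.inr (hqA seed (by simp)))
  have hseedB : seed ∈ visB := (hmemB seed).mpr (Or.inr (hsB seed (by simp)))
  have hvisA : ∀ x, x ∈ visA ↔ PvReach tmp g seed x :=
    fun x => ⟨fun h => hSA x h, fun h => pvReach_subset tmp g seed visA hseedA hsatA x h⟩
  have hvisB : ∀ x, x ∈ visB ↔ PvReach tmp g seed x :=
    fun x => ⟨fun h => hSB x h, fun h => pvReach_subset tmp g seed visB hseedB hsatB x h⟩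
  have hmemPA : ∀ x, x ∈ PA ↔ PvReach tmp g seed x := by
    intro x
    rw [← hvisA x, hmemA x]
    simp
  have hmemPB : ∀ x, x ∈ PB ↔ PvReach tmp g seed x := by
    intro x
    rw [← hvisB x, hmemB x]
    simp
  have hndPA : PA.Nodup := by simpa using hndA
  have hndPB : PB.Nodup := by simpa using hndB
  have hperm : PA.Perm PB := (List.perm_ext_iff_of_nodup hndPA hndPB).mpr
    (fun x => by rw [hmemPA x, hmemPB x])
  have hcomp : compB.toList = PB := by simpa using hcompB
  refine ⟨(visA, seenFA, 0 + (PA.length : Int),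
           0 + (PA.map (fun x => 1 + pvLocalFree tmp g x)).sum,
           0 + ((PA.filter (fun x => pvLocalFree tmp g x ≤ 1)).length : Int)),
          (visB, compB), heqA, heqB, ?_, ?_, ?_⟩
  · simp only [hcomp, Prod.mk.injEq]
    refine ⟨?_, ?_, ?_⟩
    · rw [hperm.length_eq]; ring
    · rw [(hperm.map (fun x => 1 + pvLocalFree tmp g x)).sum_eq, pvSum_one_add]; ring
    · rw [(hperm.filter (fun x => decide (pvLocalFree tmp g x ≤ 1))).length_eq, List.filter_map]
      simp only [List.length_map]
      have hcg : (List.filter (fun x => decide (pvLocalFree tmp g x ≤ 1)) PB)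
          = (List.filter ((fun v => decide (v ≤ 1)) ∘ pvLocalFree tmp g) PB) :=
        List.filter_congr fun x _ => rfl
      rw [zero_add, hcg]
  · intro x
    exact hvisB x
  · intro x
    rw [hseenA x]
    simp only [Std.HashMap.contains_insert, Bool.or_eq_true, beq_iff_eq]
    have hx0 : x ∈ (∅ : Std.HashSet (Int × Int)).insert seed ↔ x = seed := hmem0 x
    constructor
    · rintro ((h | h) | ⟨h1, h2⟩)
      · exact Or.inr ((hvisA x).mp (h ▸ hseedA))
      · exact Or.inl h
      · exact Or.inr ((hvisA x).mp h1)
    · rintro (h | h)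
      · exact Or.inl (Or.inr h)
      · by_cases hx : x = seed
        · exact Or.inl (Or.inl hx.symm)
        · exact Or.inr ⟨(hvisA x).mpr h, fun hm => hx (hx0.mp hm)⟩

-- B's fold only appends to the component list
theorem pvOuterB_append (tmp : PySem.Set (Int × Int)) (g : Int) :
    ∀ (seeds : List (Int × Int)) (done : Std.HashSet (Int × Int)) (comps : List (Int × Int × Int)),
    ∃ t, (seeds.foldl (fun (st : Std.HashSet (Int × Int) × List (Int × Int × Int)) seed =>
      if st.1.contains seed then st
      else
        let dr := pvDFSB tmp g (g.toNat * g.toNat + 1) ((∅ : Std.HashSet (Int × Int)).insert seed) [seed] #[]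
        let comp := dr.2.toList
        let lfs := comp.map (pvLocalFree tmp g)
        (st.1.insertMany dr.1.toList,
         st.2 ++ [((comp.length : Int), (comp.length : Int) + lfs.sum,
                   ((lfs.filter (fun v => v ≤ 1)).length : Int))])) (done, comps)).2 = comps ++ t := by
  intro seeds
  induction seeds with
  | nil => intro done comps; exact ⟨[], by simp⟩
  | cons s rest ih =>
    intro done comps
    simp only [List.foldl_cons]
    by_cases hc : done.contains s = true
    · rw [if_pos hc]; exact ih done comps
    · rw [if_neg hc]
      obtain ⟨t, ht⟩ := ih _ _
      exact ⟨_, by rw [ht, List.append_assoc]⟩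

-- the two outer seed loops build the same component list
theorem pvOuter_eq (tmp : PySem.Set (Int × Int)) (g : Int) :
    ∀ (seeds : List (Int × Int)), (∀ s ∈ seeds, pvFree tmp g s = true) →
    ∀ (seen : Std.HashMap (Int × Int) Int) (done : Std.HashSet (Int × Int)) (comps : List (Int × Int × Int)),
    (∀ x, seen.contains x = true ↔ x ∈ done) →
    (seeds.foldl (fun (st : Std.HashMap (Int × Int) Int × List (Int × Int × Int)) seed =>
      if st.1.contains seed then st
      else
        let idx : Int := st.2.length
        let b := pvBFSA tmp g idx (g.toNat * g.toNat + 1)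
                  ((∅ : Std.HashSet (Int × Int)).insert seed) (st.1.insert seed idx) [seed] 0 0 0
        (b.2.1, st.2 ++ [(b.2.2.1, b.2.2.2.1, b.2.2.2.2)])) (seen, comps)).2 =
    (seeds.foldl (fun (st : Std.HashSet (Int × Int) × List (Int × Int × Int)) seed =>
      if st.1.contains seed then st
      else
        let dr := pvDFSB tmp g (g.toNat * g.toNat + 1) ((∅ : Std.HashSet (Int × Int)).insert seed) [seed] #[]
        let comp := dr.2.toList
        let lfs := comp.map (pvLocalFree tmp g)
        (st.1.insertMany dr.1.toList,
         st.2 ++ [((comp.length : Int), (comp.length : Int) + lfs.sum,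
                   ((lfs.filter (fun v => v ≤ 1)).length : Int))])) (done, comps)).2 := by
  intro seeds
  induction seeds with
  | nil => intro _ seen done comps _; rfl
  | cons s rest ih =>
    intro hfr seen done comps hrel
    have hfs : pvFree tmp g s = true := hfr s List.mem_cons_self
    have hrest : ∀ x ∈ rest, pvFree tmp g x = true := fun x hx => hfr x (List.mem_cons_of_mem _ hx)
    simp only [List.foldl_cons]
    by_cases hc : s ∈ done
    · rw [if_pos ((hrel s).mpr hc), if_pos (Std.HashSet.contains_iff_mem.mpr hc)]
      exact ih hrest seen done comps hrel
    · rw [if_neg (fun h => hc ((hrel s).mp h)),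
        if_neg (fun h => hc (Std.HashSet.contains_iff_mem.mp h))]
      obtain ⟨a, b, ha, hb, hstats, hbmem, hseen⟩ := pvSeed_run tmp g (comps.length : Int) s seen hfs
      rw [ha, hb, hstats]
      refine ih hrest a.2.1 (done.insertMany b.1.toList) _ ?_
      intro x
      rw [hseen x]
      constructor
      · rintro (h | h)
        · exact Std.HashSet.mem_insertMany_list.mpr (Or.inl ((hrel x).mp h))
        · exact Std.HashSet.mem_insertMany_list.mpr
            (Or.inr (List.contains_iff_mem.mpr (Std.HashSet.mem_toList.mpr ((hbmem x).mpr h))))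
      · intro h
        rcases Std.HashSet.mem_insertMany_list.mp h with h1 | h1
        · exact Or.inl ((hrel x).mpr h1)
        · exact Or.inr ((hbmem x).mp (Std.HashSet.mem_toList.mp (List.contains_iff_mem.mp h1)))

-- Python's max(comps, key=c[0]) is B's first-wins linear scan
theorem pvMax_eq (c0 : Int × Int × Int) (rest : List (Int × Int × Int)) :
    PySem.List.max? (c0 :: rest) (fun c => c.1) =
      some (rest.foldl (fun b c => if b.1 < c.1 then c else b) c0) := by
  induction rest generalizing c0 with
  | nil => rfl
  | cons x t ih =>
    have h1 : PySem.List.max? (c0 :: x :: t) (fun c => c.1) =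
        PySem.List.max? ((if c0.1 < x.1 then x else c0) :: t) (fun c => c.1) := by
      simp only [PySem.List.max?, List.foldl_cons]
      by_cases hb : c0.1 < x.1 <;> simp [hb]
    rw [h1, ih]
    simp only [List.foldl_cons]

theorem partition_and_quality_py_equal : ∀ (pos : Int × Int) (board : List (Int × Int)) (g : Int),
    partition_and_quality_py pos board g = partition_and_quality_py_alt pos board g := by
  intro pos board g
  unfold partition_and_quality_py partition_and_quality_py_alt
  have hsf : ∀ s ∈ pvSeeds pos (PySem.Set.add (PySem.Set.ofList board) pos) g,
      pvFree (PySem.Set.add (PySem.Set.ofList board) pos) g s = true :=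
    fun s hs => (List.mem_filter.mp hs).2
  cases hseeds : pvSeeds pos (PySem.Set.add (PySem.Set.ofList board) pos) g with
  | nil => simp only [hseeds, List.isEmpty_nil, if_true]
  | cons s0 srest =>
    rw [hseeds] at hsf
    simp only [hseeds, List.isEmpty_cons, Bool.false_eq_true, if_false]
    have hrel0 : ∀ x : Int × Int,
        (∅ : Std.HashMap (Int × Int) Int).contains x = true ↔
          x ∈ (∅ : Std.HashSet (Int × Int)) := by
      intro x
      simp [Std.HashMap.contains_empty, Std.HashSet.not_mem_empty]
    have hAB := pvOuter_eq (PySem.Set.add (PySem.Set.ofList board) pos) g (s0 :: srest) hsf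
      (∅ : Std.HashMap (Int × Int) Int) (∅ : Std.HashSet (Int × Int)) [] hrel0
    have hs0 : ¬ ((∅ : Std.HashSet (Int × Int)).contains s0 = true) := by
      simp
    have hne : ((s0 :: srest).foldl (fun (st : Std.HashSet (Int × Int) × List (Int × Int × Int)) seed =>
        if st.1.contains seed then st
        else
          let dr := pvDFSB (PySem.Set.add (PySem.Set.ofList board) pos) g (g.toNat * g.toNat + 1)
                      ((∅ : Std.HashSet (Int × Int)).insert seed) [seed] #[]
          let comp := dr.2.toList
          let lfs := comp.map (pvLocalFree (PySem.Set.add (PySem.Set.ofList board) pos) g)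
          (st.1.insertMany dr.1.toList,
           st.2 ++ [((comp.length : Int), (comp.length : Int) + lfs.sum,
                     ((lfs.filter (fun v => v ≤ 1)).length : Int))]))
        ((∅ : Std.HashSet (Int × Int)), [])).2 ≠ [] := by
      rw [List.foldl_cons, if_neg hs0]
      obtain ⟨t, hBt⟩ := pvOuterB_append (PySem.Set.add (PySem.Set.ofList board) pos) g srest _ _
      rw [hBt]
      simp
    cases hL : ((s0 :: srest).foldl (fun (st : Std.HashSet (Int × Int) × List (Int × Int × Int)) seed =>
        if st.1.contains seed then st
        else
          let dr := pvDFSB (PySem.Set.add (PySem.Set.ofList board) pos) g (g.toNat * g.toNat + 1)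
                      ((∅ : Std.HashSet (Int × Int)).insert seed) [seed] #[]
          let comp := dr.2.toList
          let lfs := comp.map (pvLocalFree (PySem.Set.add (PySem.Set.ofList board) pos) g)
          (st.1.insertMany dr.1.toList,
           st.2 ++ [((comp.length : Int), (comp.length : Int) + lfs.sum,
                     ((lfs.filter (fun v => v ≤ 1)).length : Int))]))
        ((∅ : Std.HashSet (Int × Int)), [])).2 with
    | nil => exact absurd hL hne
    | cons c0 cr =>
      rw [hAB, hL]
      simp only [pvMax_eq]

-- ===== VERDICT (by name: the statement is the Claim_ definition above) =====
theorem partition_and_quality_py_spec : Claim_equal_partition_and_quality_py := by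
  intro pos board g _
  unfold Spec_partition_and_quality_py
  exact partition_and_quality_py_equal pos board g
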